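-- pv_equiv track=rewrite | github.com/ashishmh/epi-judge | epi_judge_python/picking_up_coins.py | maximum_revenue
-- ===== SOURCE A (Python) =====
-- def maximum_revenue(coins):
--     # sum is the sum of all elements from start to end inclusive
--     def maximum_revenue_inner(start, end, sum, state):
--         if start > end:
--             return 0
--         if state[start][end] is not None:
--             return state[start][end]
--
--         sum_left = sum - coins[start]
--         pick_left = coins[start] + sum_left - maximum_revenue_inner(start + 1, end, sum_left, state)
--         sum_right = sum - coins[end]
--         pick_right = coins[end] + sum_right - maximum_revenue_inner(start, end - 1, sum_right, state)
--         state[start][end] = max(pick_left, pick_right)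
--         return state[start][end]
--
--     sum = 0
--     n = len(coins)
--     for i in range(n):
--         sum += coins[i]
--     return maximum_revenue_inner(0, n - 1, sum, [[None] * n for _ in range(n)])
-- ===== SOURCE B (Python) =====
-- def maximum_revenue(coins):
--     n = len(coins)
--     if n == 0:
--         return 0
--     # prefix[k] = sum of coins[:k], so any range sum is one subtraction
--     prefix = [0]
--     s = 0
--     for c in coins:
--         s += c
--         prefix.append(s)
--     # dp[i] = best revenue on the interval of the current length starting at i
--     dp = list(coins)  # length-1 intervals
--     for length in range(2, n + 1):
--         dp = [
--             max(
--                 coins[i] + (prefix[i + length] - prefix[i + 1]) - dp[i + 1],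
--                 coins[i + length - 1] + (prefix[i + length - 1] - prefix[i]) - dp[i],
--             )
--             for i in range(n - length + 1)
--         ]
--     return dp[0]
-- ===== Notes on version B (the rewrite author's own statement) =====
-- stated objective: alternative
-- what changed: Replaced the memoized top-down recursion threading a running range-sum through a 2D None-table with an iterative bottom-up sweep over interval lengths that keeps only a 1D row of interval values and reads range sums from a precomputed prefix-sum array.
import Mathlib
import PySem

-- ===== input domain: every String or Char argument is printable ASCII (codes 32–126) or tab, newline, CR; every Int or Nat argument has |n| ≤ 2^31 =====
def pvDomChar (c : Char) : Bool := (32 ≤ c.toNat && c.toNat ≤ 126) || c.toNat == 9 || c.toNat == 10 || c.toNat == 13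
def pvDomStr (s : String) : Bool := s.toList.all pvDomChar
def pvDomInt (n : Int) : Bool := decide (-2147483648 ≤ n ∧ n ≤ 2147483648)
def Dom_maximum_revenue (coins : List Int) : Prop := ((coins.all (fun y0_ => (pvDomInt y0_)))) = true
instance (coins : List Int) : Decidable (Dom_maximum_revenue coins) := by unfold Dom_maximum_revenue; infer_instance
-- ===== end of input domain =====

-- B replaces A's memoized top-down recursion (2D None-table, threaded range sum) by a
-- bottom-up sweep over interval lengths keeping one 1D row and a prefix-sum array (objective: alternative).

-- ===== PORT A =====
-- state[s][e] read; every index used is nonnegative and in range, where pyGet? is exact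
def pvGet2 (st : List (List (Option Int))) (s e : Int) : Option (Option Int) :=
  (PySem.List.pyGet? st s).bind (fun row => PySem.List.pyGet? row e)

-- state[s][e] = v ; indices are nonnegative and in range at every call site, where pySetD/pyGetD are exact
def pvSet2 (st : List (List (Option Int))) (s e : Int) (v : Int) : List (List (Option Int)) :=
  PySem.List.pySetD st s (PySem.List.pySetD (PySem.List.pyGetD st s []) e (some v))

-- maximum_revenue_inner: the memo table is threaded as explicit state (Python mutates it in place)
def pvInner (coins : List Int) (start end_ sum : Int) (state : List (List (Option Int))) :
    Int × List (List (Option Int)) :=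
  if h : start > end_ then (0, state)
  else
    match pvGet2 state start end_ with
    | some (some v) => (v, state)
    | _ =>
      let sum_left := sum - PySem.List.pyGetD coins start 0
      let r1 := pvInner coins (start + 1) end_ sum_left state
      let pick_left := PySem.List.pyGetD coins start 0 + sum_left - r1.1
      let sum_right := sum - PySem.List.pyGetD coins end_ 0
      let r2 := pvInner coins start (end_ - 1) sum_right r1.2
      let pick_right := PySem.List.pyGetD coins end_ 0 + sum_right - r2.1
      let v := max pick_left pick_right
      (v, pvSet2 r2.2 start end_ v)
  termination_by (end_ + 1 - start).toNat
  decreasing_by all_goals omega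

def maximum_revenue (coins : List Int) : Int :=
  let n : Int := PySem.List.len coins
  let sum := (PySem.List.pyRange 0 n).foldl (fun s i => s + PySem.List.pyGetD coins i 0) 0
  (pvInner coins 0 (n - 1) sum
    ((PySem.List.pyRange 0 n).map (fun _ => List.replicate coins.length (none : Option Int)))).1

-- ===== PORT B =====
def maximum_revenue_alt (coins : List Int) : Int :=
  let n : Int := PySem.List.len coins
  if n = 0 then 0
  else
    let pf := (coins.foldl (fun (p : List Int × Int) c => (p.1 ++ [p.2 + c], p.2 + c)) ([0], 0)).1
    let dp :=
      (PySem.List.pyRange 2 (n + 1)).foldl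
        (fun dp length =>
          (PySem.List.pyRange 0 (n - length + 1)).map (fun i =>
            max
              (PySem.List.pyGetD coins i 0 +
                (PySem.List.pyGetD pf (i + length) 0 - PySem.List.pyGetD pf (i + 1) 0) -
                PySem.List.pyGetD dp (i + 1) 0)
              (PySem.List.pyGetD coins (i + length - 1) 0 +
                (PySem.List.pyGetD pf (i + length - 1) 0 - PySem.List.pyGetD pf i 0) -
                PySem.List.pyGetD dp i 0)))
        coins
    PySem.List.pyGetD dp 0 0

-- ===== PRECONDITION & SPEC =====
def Spec_maximum_revenue (coins : List Int) (out : Int) : Prop := out = maximum_revenue_alt coins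
instance (coins : List Int) (out : Int) : Decidable (Spec_maximum_revenue coins out) := by
  unfold Spec_maximum_revenue; infer_instance

-- ===== CLAIM (what is proved, stated in full; the proofs are below) =====
def Claim_equal_maximum_revenue : Prop :=
  ∀ (coins : List Int), Dom_maximum_revenue coins → Spec_maximum_revenue coins (maximum_revenue coins)

-- ===== LEMMAS AND PROOFS =====

-- sum of the L coins starting at index i
def pvSumR (coins : List Int) (i L : Nat) : Int := ((coins.drop i).take L).sum

-- game value of the interval of length L starting at i (the common mathematical spec)
def pvG (coins : List Int) : Nat → Nat → Int
  | _, 0 => 0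
  | i, L + 1 =>
      max (coins.getD i 0 + pvSumR coins (i + 1) L - pvG coins (i + 1) L)
          (coins.getD (i + L) 0 + pvSumR coins i L - pvG coins i L)

lemma pvSumR_zero (coins : List Int) (i : Nat) : pvSumR coins i 0 = 0 := rfl

lemma pvSumR_succ_left (coins : List Int) (i L : Nat) (h : i < coins.length) :
    pvSumR coins i (L + 1) = coins.getD i 0 + pvSumR coins (i + 1) L := by
  unfold pvSumR
  rw [List.drop_eq_getElem_cons h, List.take_succ_cons, List.sum_cons, List.getD_eq_getElem coins 0 h]

lemma pvSumR_succ_right (coins : List Int) (i L : Nat) (h : i + L < coins.length) :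
    pvSumR coins i (L + 1) = pvSumR coins i L + coins.getD (i + L) 0 := by
  unfold pvSumR
  rw [List.take_add_one, List.sum_append]
  have hL : L < (coins.drop i).length := by simp [List.length_drop]; omega
  rw [List.getElem?_eq_getElem hL, List.getElem_drop, List.getD_eq_getElem coins 0 h]
  simp

lemma pvSumR_eq_take (coins : List Int) (i L : Nat) :
    (coins.take (i + L)).sum = (coins.take i).sum + pvSumR coins i L := by
  rw [List.take_add, List.sum_append]; rfl

-- memo-table invariant: every filled entry already holds the game value
def pvInv (coins : List Int) (st : List (List (Option Int))) : Prop :=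
  ∀ (s e : Nat) (v : Int), pvGet2 st (s : Int) (e : Int) = some (some v) → v = pvG coins s (e + 1 - s)

lemma pvGet2_natCast (st : List (List (Option Int))) (s e : Nat) :
    pvGet2 st (s : Int) (e : Int) = st[s]?.bind (fun row => row[e]?) := by
  simp [pvGet2]

lemma pvInv_set2 (coins : List Int) (st : List (List (Option Int))) (a b : Int)
    (ha : 0 ≤ a) (hb : 0 ≤ b) (v : Int)
    (hv : v = pvG coins a.toNat (b.toNat + 1 - a.toNat)) (hInv : pvInv coins st) :
    pvInv coins (pvSet2 st a b v) := by
  obtain ⟨a', rfl⟩ : ∃ a' : Nat, a = (a' : Int) := ⟨a.toNat, by omega⟩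
  obtain ⟨b', rfl⟩ : ∃ b' : Nat, b = (b' : Int) := ⟨b.toNat, by omega⟩
  simp only [Int.toNat_natCast] at hv
  intro s e w h
  have hset : pvSet2 st (a' : Int) (b' : Int) v
      = st.set a' ((st.getD a' []).set b' (some v)) := by
    simp [pvSet2]
  rw [hset, pvGet2_natCast, List.getElem?_set] at h
  split at h
  · next has =>
    split at h
    · next hal =>
      rw [List.getD_eq_getElem st [] hal] at h
      simp only [Option.bind_some, List.getElem?_set] at h
      split at h
      · next hbe =>
        split at h
        · next => subst has hbe
                  cases h
                  exact hv
        · next => cases h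
      · next hbe =>
        refine hInv s e w ?_
        rw [pvGet2_natCast, ← has, List.getElem?_eq_getElem hal]
        simpa using h
    · next => cases h
  · next has =>
    exact hInv s e w (by rw [pvGet2_natCast]; exact h)

lemma pvInv_init (coins : List Int) (m n : Nat) :
    pvInv coins (((PySem.List.pyRange 0 (m : Int)).map
      (fun _ => List.replicate n (none : Option Int)))) := by
  intro s e v h
  rw [pvGet2_natCast] at h
  rcases hs : ((PySem.List.pyRange 0 (m : Int)).map
      (fun _ => List.replicate n (none : Option Int)))[s]? with _ | row
  · rw [hs] at h; simp at h
  · rw [hs] at h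
    have hrow : row = List.replicate n (none : Option Int) := by
      rcases List.getElem?_eq_some_iff.1 (by simpa using hs) with ⟨hlt, hget⟩
      simpa using hget.symm
    subst hrow
    simp only [Option.bind_some, List.getElem?_replicate] at h
    split at h <;> simp_all

lemma pvInner_eq (coins : List Int) :
    ∀ (L : Nat) (start end_ : Int) (st : List (List (Option Int))),
      0 ≤ start → end_ < (coins.length : Int) → (end_ + 1 - start).toNat = L → pvInv coins st →
      (pvInner coins start end_ (pvSumR coins start.toNat L) st).1 = pvG coins start.toNat L ∧
      pvInv coins (pvInner coins start end_ (pvSumR coins start.toNat L) st).2 := by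
  intro L
  induction L using Nat.strong_induction_on with
  | _ L IH =>
  intro start end_ st h0 hend hL hInv
  by_cases hgt : start > end_
  · have hL0 : L = 0 := by omega
    subst hL0
    rw [pvInner.eq_def, dif_pos hgt]
    exact ⟨rfl, hInv⟩
  · have hse : start ≤ end_ := by omega
    obtain ⟨L', rfl⟩ : ∃ L', L = L' + 1 := ⟨L - 1, by omega⟩
    have hslen : start.toNat < coins.length := by omega
    have helen : end_.toNat < coins.length := by omega
    have het : end_.toNat = start.toNat + L' := by omega
    have hcs : start = ((start.toNat : Nat) : Int) := by omega
    have hce : end_ = ((end_.toNat : Nat) : Int) := by omega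
    have hc_s : PySem.List.pyGetD coins start 0 = coins.getD start.toNat 0 := by
      rw [hcs, PySem.List.pyGetD_natCast, Int.toNat_natCast]
    have hc_e : PySem.List.pyGetD coins end_ 0 = coins.getD end_.toNat 0 := by
      rw [hce, PySem.List.pyGetD_natCast, Int.toNat_natCast]
    have hsum_left : pvSumR coins start.toNat (L' + 1) - coins.getD start.toNat 0
        = pvSumR coins (start.toNat + 1) L' := by
      rw [pvSumR_succ_left _ _ _ hslen]; ring
    have hsum_right : pvSumR coins start.toNat (L' + 1) - coins.getD end_.toNat 0
        = pvSumR coins start.toNat L' := by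
      rw [het, pvSumR_succ_right _ _ _ (by omega)]; ring
    have IH1 := IH L' (by omega) (start + 1) end_ st (by omega) hend (by omega) hInv
    rw [show (start + 1).toNat = start.toNat + 1 from by omega] at IH1
    have IH2 := IH L' (by omega) start (end_ - 1) (pvInner coins (start + 1) end_
        (pvSumR coins (start.toNat + 1) L') st).2 h0 (by omega) (by omega) IH1.2
    rw [pvInner.eq_def, dif_neg hgt]
    rcases hm : pvGet2 st start end_ with _ | mv
    · -- cache miss (entry absent cannot occur: the table is full n×n)
      simp only [hc_s, hc_e, hsum_left, hsum_right]
      rw [IH1.1, IH2.1]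
      refine ⟨?_, ?_⟩
      · show max _ _ = pvG coins start.toNat (L' + 1)
        rw [pvG, ← het]
      · refine pvInv_set2 coins _ start end_ h0 (by omega) _ ?_ IH2.2
        rw [show end_.toNat + 1 - start.toNat = L' + 1 from by omega, pvG, ← het]
    · rcases mv with _ | v
      · -- entry still None: recompute
        simp only [hc_s, hc_e, hsum_left, hsum_right]
        rw [IH1.1, IH2.1]
        refine ⟨?_, ?_⟩
        · show max _ _ = pvG coins start.toNat (L' + 1)
          rw [pvG, ← het]
        · refine pvInv_set2 coins _ start end_ h0 (by omega) _ ?_ IH2.2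
          rw [show end_.toNat + 1 - start.toNat = L' + 1 from by omega, pvG, ← het]
      · -- cache hit
        rw [hcs, hce] at hm
        have hv := hInv start.toNat end_.toNat v hm
        rw [show end_.toNat + 1 - start.toNat = L' + 1 from by omega] at hv
        exact ⟨hv, hInv⟩

-- prefix-list built by B's first loop
def pvPref (s : Int) : List Int → List Int
  | [] => []
  | c :: l => (s + c) :: pvPref (s + c) l

lemma pvPref_foldl (l : List Int) :
    ∀ (P : List Int) (s : Int),
      (l.foldl (fun (p : List Int × Int) c => (p.1 ++ [p.2 + c], p.2 + c)) (P, s)) =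
        (P ++ pvPref s l, s + l.sum) := by
  induction l with
  | nil => intro P s; simp [pvPref]
  | cons c l ih => intro P s; simp [pvPref, List.foldl_cons, ih, add_assoc]

lemma pvPref_getD (l : List Int) :
    ∀ (s : Int) (k : Nat), k < l.length → (pvPref s l).getD k 0 = s + (l.take (k + 1)).sum := by
  induction l with
  | nil => intro s k h; simp at h
  | cons c l ih =>
    intro s k h
    cases k with
    | zero => simp [pvPref]
    | succ k => simp only [pvPref, List.getD_cons_succ, List.take_succ_cons, List.sum_cons]
                rw [ih (s + c) k (by simpa using h)]; ring

lemma pvPrefix_getD (coins : List Int) (k : Nat) (h : k ≤ coins.length) :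
    ((0 : Int) :: pvPref 0 coins).getD k 0 = (coins.take k).sum := by
  cases k with
  | zero => simp
  | succ k => rw [List.getD_cons_succ, pvPref_getD coins 0 k (by omega)]; simp

lemma pvG_one (coins : List Int) (i : Nat) (h : i < coins.length) :
    pvG coins i 1 = coins.getD i 0 := by
  show max _ _ = _
  simp [pvSumR_zero, pvG]

lemma pvRow_base (coins : List Int) :
    coins = (List.range coins.length).map (fun i => pvG coins i 1) := by
  apply List.ext_getElem
  · simp
  · intro i h1 h2
    simp only [List.getElem_map, List.getElem_range]
    rw [pvG_one coins i h1, List.getD_eq_getElem coins 0 h1]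

lemma pvDp_fold (coins : List Int)
    (pf : List Int) (hpf : ∀ k : Nat, k ≤ coins.length → pf.getD k 0 = (coins.take k).sum) :
    ∀ (ℓ : Nat), 1 ≤ ℓ → ℓ ≤ coins.length →
      ((PySem.List.pyRange 2 ((ℓ : Int) + 1)).foldl
        (fun dp length =>
          (PySem.List.pyRange 0 ((coins.length : Int) - length + 1)).map (fun i =>
            max
              (PySem.List.pyGetD coins i 0 +
                (PySem.List.pyGetD pf (i + length) 0 - PySem.List.pyGetD pf (i + 1) 0) -
                PySem.List.pyGetD dp (i + 1) 0)
              (PySem.List.pyGetD coins (i + length - 1) 0 +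
                (PySem.List.pyGetD pf (i + length - 1) 0 - PySem.List.pyGetD pf i 0) -
                PySem.List.pyGetD dp i 0)))
        coins) =
      (List.range (coins.length - ℓ + 1)).map (fun i => pvG coins i ℓ) := by
  intro ℓ h1 h2
  induction ℓ, h1 using Nat.le_induction with
  | base =>
    rw [show ((1 : Nat) : Int) + 1 = 2 from by norm_num, PySem.List.pyRange_one_eq_nil (by omega)]
    rw [show coins.length - 1 + 1 = coins.length from by omega]
    exact pvRow_base coins
  | succ ℓ hℓ ih =>
    have hln : ℓ ≤ coins.length := by omega
    rw [show (((ℓ + 1 : Nat)) : Int) + 1 = ((ℓ : Int) + 1) + 1 from by push_cast; ring]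
    rw [PySem.List.pyRange_one_succ_right (by omega), List.foldl_append, ih hln]
    simp only [List.foldl_cons, List.foldl_nil]
    rw [show (coins.length : Int) - ((ℓ : Int) + 1) + 1 = ((coins.length - ℓ : Nat) : Int) from by omega]
    rw [PySem.List.pyRange_zero_nat, List.map_map,
        show coins.length - (ℓ + 1) + 1 = coins.length - ℓ from by omega]
    apply List.map_congr_left
    intro i hi
    have hi' : i < coins.length - ℓ := List.mem_range.1 hi
    simp only [Function.comp_apply]
    have e1 : (i : Int) + ((ℓ : Int) + 1) = ((i + ℓ + 1 : Nat) : Int) := by push_cast; ring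
    have e2 : (i : Int) + 1 = ((i + 1 : Nat) : Int) := by push_cast; ring
    have e3 : (i : Int) + ((ℓ : Int) + 1) - 1 = ((i + ℓ : Nat) : Int) := by push_cast; ring
    rw [e2, e3, e1]
    simp only [PySem.List.pyGetD_natCast]
    rw [hpf (i + ℓ + 1) (by omega), hpf (i + 1) (by omega), hpf (i + ℓ) (by omega),
        hpf i (by omega)]
    rw [PySem.List.getD_map_range _ _ _ _ (by omega), PySem.List.getD_map_range _ _ _ _ (by omega)]
    have t1 : (coins.take (i + ℓ + 1)).sum - (coins.take (i + 1)).sum = pvSumR coins (i + 1) ℓ := by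
      have := pvSumR_eq_take coins (i + 1) ℓ
      rw [show i + 1 + ℓ = i + ℓ + 1 from by omega] at this
      omega
    have t2 : (coins.take (i + ℓ)).sum - (coins.take i).sum = pvSumR coins i ℓ := by
      have := pvSumR_eq_take coins i ℓ
      omega
    rw [show coins.getD i 0 + ((coins.take (i + ℓ + 1)).sum - (coins.take (i + 1)).sum)
          - pvG coins (i + 1) ℓ
        = coins.getD i 0 + pvSumR coins (i + 1) ℓ - pvG coins (i + 1) ℓ from by rw [← t1]]
    rw [show coins.getD (i + ℓ) 0 + ((coins.take (i + ℓ)).sum - (coins.take i).sum)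
          - pvG coins i ℓ
        = coins.getD (i + ℓ) 0 + pvSumR coins i ℓ - pvG coins i ℓ from by rw [← t2]]
    rw [pvG]

lemma alt_eq_pvG (coins : List Int) (h : coins ≠ []) :
    maximum_revenue_alt coins = pvG coins 0 coins.length := by
  have hn : coins.length ≠ 0 := by simpa using h
  unfold maximum_revenue_alt
  simp only [PySem.List.len_eq]
  rw [if_neg (by exact_mod_cast hn)]
  have hpf : (coins.foldl (fun (p : List Int × Int) c => (p.1 ++ [p.2 + c], p.2 + c)) ([0], 0)).1
      = (0 : Int) :: pvPref 0 coins := by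
    rw [pvPref_foldl]; rfl
  rw [hpf]
  rw [pvDp_fold coins _ (fun k hk => pvPrefix_getD coins k hk) coins.length (by omega) le_rfl]
  rw [show coins.length - coins.length + 1 = 1 from by omega]
  simp

lemma a_eq_pvG (coins : List Int) :
    maximum_revenue coins = pvG coins 0 coins.length := by
  unfold maximum_revenue
  simp only [PySem.List.len_eq]
  have hsum : ((PySem.List.pyRange 0 (coins.length : Int)).foldl
      (fun s i => s + PySem.List.pyGetD coins i 0) 0) = pvSumR coins 0 coins.length := by
    rw [PySem.List.foldl_add (g := fun i => PySem.List.pyGetD coins i 0)]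
    rw [show PySem.List.pyRange 0 (coins.length : Int)
        = PySem.List.pyRange 0 (PySem.List.len coins) from by rw [PySem.List.len_eq]]
    rw [PySem.List.map_pyGetD_pyRange_zero]
    unfold pvSumR
    rw [List.drop_zero, List.take_length, List.sum_eq_foldl]
    simp
  rw [hsum]
  have := pvInner_eq coins coins.length 0 ((coins.length : Int) - 1)
      ((PySem.List.pyRange 0 (coins.length : Int)).map
        (fun _ => List.replicate coins.length (none : Option Int)))
      (by omega) (by omega) (by omega) (pvInv_init coins coins.length coins.length)
  simpa using this.1

-- ===== VERDICT (by name: the statement is the Claim_ definition above) =====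
theorem maximum_revenue_spec : Claim_equal_maximum_revenue := by
  intro coins _
  unfold Spec_maximum_revenue
  rcases eq_or_ne coins [] with rfl | h
  · rw [a_eq_pvG]; decide
  · rw [a_eq_pvG coins, alt_eq_pvG coins h]
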